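-- pv_equiv track=rewrite | github.com/nadavgover/reels-maker | analyze_audio.py | get_beat_intervals_greater_than_threshold
-- ===== SOURCE A (Python) =====
-- def get_beat_intervals_greater_than_threshold(beat_timestamps, threshold):
--     beat_timestamps = beat_timestamps[:]
--     beat_timestamps.insert(0, 0)
--     beat_intervals = []
--     last_used_i = 0
--     for i, beat_timestamp in enumerate(beat_timestamps[1:], 1):
--         for prev_timestamp in reversed(beat_timestamps[last_used_i:i]):
--             interval = beat_timestamp - prev_timestamp
--             if interval > threshold:
--                 beat_intervals.append(interval)
--                 last_used_i = i
--                 break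
--     return beat_intervals
-- ===== SOURCE B (Python) =====
-- def get_beat_intervals_greater_than_threshold(beat_timestamps, threshold):
--     # Monotonic-stack re-implementation: instead of rescanning the whole
--     # window of timestamps since the last accepted beat, keep only the
--     # strictly increasing stack of "prefix-minimum" candidates (top = most
--     # recent timestamp); the nearest previous timestamp below
--     # beat - threshold is then found by binary search.
--     intervals = []
--     stack = [0]  # strictly increasing; stack[-1] is the most recent candidate
--     for ts in beat_timestamps:
--         x = ts - threshold
--         if stack[0] < x:
--             # rightmost stack element < x  (== nearest previous timestamp
--             # in the pending window whose interval exceeds the threshold)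
--             lo, hi = 0, len(stack)
--             while lo < hi:
--                 mid = (lo + hi) // 2
--                 if stack[mid] < x:
--                     lo = mid + 1
--                 else:
--                     hi = mid
--             intervals.append(ts - stack[lo - 1])
--             stack = [ts]
--         else:
--             while stack and stack[-1] >= ts:
--                 stack.pop()
--             stack.append(ts)
--     return intervals
-- ===== Notes on version B (the rewrite author's own statement) =====
-- stated objective: faster
-- what changed: A rescans the whole pending window (all timestamps since the last accepted beat) backwards at every step; B keeps only a monotonic stack of prefix-minimum candidate timestamps (maintained amortized O(1)) and finds the nearest previous timestamp below beat-threshold by binary search on that stack.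
import Mathlib
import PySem

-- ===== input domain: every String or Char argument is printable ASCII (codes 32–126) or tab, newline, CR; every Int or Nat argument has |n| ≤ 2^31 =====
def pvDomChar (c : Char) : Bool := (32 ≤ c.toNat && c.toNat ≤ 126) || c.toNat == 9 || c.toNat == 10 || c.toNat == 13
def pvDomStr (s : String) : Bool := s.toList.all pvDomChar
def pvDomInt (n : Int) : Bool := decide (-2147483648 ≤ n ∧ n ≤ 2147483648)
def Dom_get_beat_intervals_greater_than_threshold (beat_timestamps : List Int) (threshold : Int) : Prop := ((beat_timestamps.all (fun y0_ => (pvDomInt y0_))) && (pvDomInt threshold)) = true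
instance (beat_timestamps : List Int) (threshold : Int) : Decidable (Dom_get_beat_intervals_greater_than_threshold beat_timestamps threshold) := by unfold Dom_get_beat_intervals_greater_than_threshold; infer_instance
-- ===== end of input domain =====

-- B replaces A's quadratic rescanning of the whole window since the last accepted beat by a
-- monotonic stack of prefix-minimum candidates queried by binary search (objective: faster).

-- ===== PORT A =====
-- enumerate(xs, i): list of (index, element) pairs starting at index i
def pvEnum1 : Nat → List Int → List (Nat × Int)
  | _, [] => []
  | i, a :: rest => (i, a) :: pvEnum1 (i + 1) rest

-- A's outer loop; state = (beat_intervals acc, last_used_i).  The inner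
-- 'for prev in reversed(bt[last:i]): … break' is find? over the reversed slice;
-- the slice bt[last:i] (0 ≤ last ≤ i, indices from enumerate) is drop/take, exact here.
def pvA_loop (bt : List Int) (threshold : Int) : List (Nat × Int) → List Int → Nat → List Int
  | [], acc, _ => acc
  | (i, ts) :: rest, acc, last =>
    match ((bt.drop last).take (i - last)).reverse.find? (fun prev => decide (threshold < ts - prev)) with
    | some prev => pvA_loop bt threshold rest (acc ++ [ts - prev]) i
    | none => pvA_loop bt threshold rest acc last

def get_beat_intervals_greater_than_threshold (beat_timestamps : List Int) (threshold : Int) : List Int :=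
  pvA_loop (0 :: beat_timestamps) threshold (pvEnum1 1 beat_timestamps) [] 0

-- ===== PORT B =====
-- the 'while lo < hi' binary-search loop of Source B (stack[mid] is always in range; getD is exact)
def pvB_bs (stack : List Int) (x : Int) (lo hi : Nat) : Nat :=
  if _h : lo < hi then
    let mid := (lo + hi) / 2
    if stack.getD mid 0 < x then pvB_bs stack x (mid + 1) hi
    else pvB_bs stack x lo mid
  else lo
termination_by hi - lo
decreasing_by all_goals omega

-- the 'while stack and stack[-1] >= ts: stack.pop()' loop followed by 'stack.append(ts)'
def pvB_push (stack : List Int) (ts : Int) : List Int :=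
  match hg : stack.getLast? with
  | some v => if ts ≤ v then pvB_push stack.dropLast ts else stack ++ [ts]
  | none => stack ++ [ts]
termination_by stack.length
decreasing_by
  have hne : stack ≠ [] := by intro hn; subst hn; simp at hg
  have hl : 0 < stack.length := List.length_pos_iff.mpr hne
  rw [List.length_dropLast]; omega

-- Source B's main loop; state = (intervals acc, stack); stack[0] and stack[lo-1]
-- are always in range in Source B, so getD is exact.
def pvB_loop (threshold : Int) : List Int → List Int → List Int → List Int
  | [], acc, _ => acc
  | ts :: rest, acc, stack =>
    let x := ts - threshold
    if stack.getD 0 0 < x then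
      let lo := pvB_bs stack x 0 stack.length
      pvB_loop threshold rest (acc ++ [ts - stack.getD (lo - 1) 0]) [ts]
    else
      pvB_loop threshold rest acc (pvB_push stack ts)

def get_beat_intervals_greater_than_threshold_alt (beat_timestamps : List Int) (threshold : Int) : List Int :=
  pvB_loop threshold beat_timestamps [] [0]

-- ===== PRECONDITION & SPEC =====
def Spec_get_beat_intervals_greater_than_threshold (beat_timestamps : List Int) (threshold : Int) (out : List Int) : Prop := out = get_beat_intervals_greater_than_threshold_alt beat_timestamps threshold
instance (beat_timestamps : List Int) (threshold : Int) (out : List Int) : Decidable (Spec_get_beat_intervals_greater_than_threshold beat_timestamps threshold out) := by unfold Spec_get_beat_intervals_greater_than_threshold; infer_instance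

-- ===== CLAIM (what is proved, stated in full; the proofs are below) =====
def Claim_equal_get_beat_intervals_greater_than_threshold : Prop := ∀ (beat_timestamps : List Int) (threshold : Int), Dom_get_beat_intervals_greater_than_threshold beat_timestamps threshold → Spec_get_beat_intervals_greater_than_threshold beat_timestamps threshold (get_beat_intervals_greater_than_threshold beat_timestamps threshold)

-- ===== LEMMAS AND PROOFS =====

-- common specification both loops are reduced to: remaining timestamps, pending window u (nearest previous timestamp first)
def pvSpec (threshold : Int) : List Int → List Int → List Int
  | [], _ => []
  | ts :: rest, u =>
    match u.find? (fun p => decide (threshold < ts - p)) with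
    | some p => (ts - p) :: pvSpec threshold rest [ts]
    | none => pvSpec threshold rest (ts :: u)

-- the strictly decreasing prefix-minimum stack of the window u (nearest first)
def pvMS : List Int → List Int
  | [] => []
  | a :: u => a :: (pvMS u).dropWhile (fun v => decide (a ≤ v))

theorem pvA_bridge (bt : List Int) (th : Int) :
    ∀ (rest : List Int) (i last : Nat) (acc : List Int),
      last ≤ i → bt.drop i = rest →
      pvA_loop bt th (pvEnum1 i rest) acc last
        = acc ++ pvSpec th rest ((bt.drop last).take (i - last)).reverse := by
  intro rest
  induction rest with
  | nil => intro i last acc h1 h2; simp [pvEnum1, pvA_loop, pvSpec]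
  | cons ts rest ih =>
    intro i last acc h1 h2
    have hilen : i < bt.length := by
      by_contra hc
      rw [List.drop_eq_nil_of_le (by omega)] at h2; cases h2
    have hdrop' : bt.drop (i+1) = rest := by
      rw [← List.tail_drop, h2]; rfl
    have hw : bt.drop last = (bt.drop last).take (i - last) ++ ts :: rest := by
      conv_lhs => rw [← List.take_append_drop (i - last) (bt.drop last)]
      rw [List.drop_drop]
      have h4 : last + (i - last) = i := by omega
      rw [h4, h2]
    have hwlen : ((bt.drop last).take (i - last)).length = i - last := by
      simp [List.length_take, List.length_drop]; omega
    have hwin' : (bt.drop last).take (i + 1 - last) = (bt.drop last).take (i - last) ++ [ts] := by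
      conv_lhs => rw [hw]
      have h3 : i + 1 - last = ((bt.drop last).take (i - last)).length + 1 := by omega
      rw [h3, List.take_append]
      simp
    simp only [pvEnum1, pvA_loop, pvSpec]
    cases hfind : (((bt.drop last).take (i - last)).reverse.find? (fun prev => decide (th < ts - prev))) with
    | some p =>
      show pvA_loop bt th (pvEnum1 (i+1) rest) (acc ++ [ts - p]) i
            = acc ++ ((ts - p) :: pvSpec th rest [ts])
      rw [ih (i+1) i _ (by omega) hdrop']
      have : (bt.drop i).take (i + 1 - i) = [ts] := by
        have : i + 1 - i = 1 := by omega
        rw [this, h2]; rfl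
      rw [this]
      simp
    | none =>
      show pvA_loop bt th (pvEnum1 (i+1) rest) acc last
            = acc ++ pvSpec th rest (ts :: ((bt.drop last).take (i - last)).reverse)
      rw [ih (i+1) last _ (by omega) hdrop', hwin']
      simp


theorem pv_sorted_getD {s : List Int} (hs : s.Pairwise (· < ·)) {i j : Nat}
    (hij : i < j) (hj : j < s.length) : s.getD i 0 < s.getD j 0 := by
  rw [s.getD_eq_getElem 0 (by omega), s.getD_eq_getElem 0 hj]
  exact List.pairwise_iff_getElem.mp hs i j (by omega) hj hij


theorem pv_dropWhile_lt (a : Int) :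
    ∀ m : List Int, m.Pairwise (· > ·) →
      ∀ v ∈ m.dropWhile (fun v => decide (a ≤ v)), v < a := by
  intro m
  induction m with
  | nil => simp
  | cons b m ih =>
    intro hp v hv
    by_cases hb : a ≤ b
    · rw [List.dropWhile_cons_of_pos (by simpa using hb)] at hv
      exact ih hp.of_cons v hv
    · rw [List.dropWhile_cons_of_neg (by simpa using hb)] at hv
      rcases List.mem_cons.mp hv with rfl | hv
      · omega
      · have := hp.of_cons; have hbv := (List.pairwise_cons.mp hp).1 v hv; omega


theorem pvMS_pairwise (u : List Int) : (pvMS u).Pairwise (· > ·) := by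
  induction u with
  | nil => simp [pvMS]
  | cons a u ih =>
    simp only [pvMS]
    refine List.Pairwise.cons ?_ (ih.sublist (List.dropWhile_sublist _))
    intro v hv
    exact pv_dropWhile_lt a (pvMS u) ih v hv


theorem pv_find_drop (a x : Int) (hx : x ≤ a) :
    ∀ m : List Int, (m.dropWhile (fun v => decide (a ≤ v))).find? (fun p => decide (p < x))
      = m.find? (fun p => decide (p < x)) := by
  intro m
  induction m with
  | nil => simp
  | cons v m ih =>
    by_cases hv : a ≤ v
    · rw [List.dropWhile_cons_of_pos (by simpa using hv), ih,
        List.find?_cons_of_neg (by simp; omega)]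
    · rw [List.dropWhile_cons_of_neg (by simpa using hv)]


theorem pvMS_find (x : Int) (u : List Int) :
    u.find? (fun p => decide (p < x)) = (pvMS u).find? (fun p => decide (p < x)) := by
  induction u with
  | nil => simp [pvMS]
  | cons a u ih =>
    simp only [pvMS]
    by_cases ha : a < x
    · rw [List.find?_cons_of_pos (by simpa using ha), List.find?_cons_of_pos (by simpa using ha)]
    · rw [List.find?_cons_of_neg (by simpa using ha), List.find?_cons_of_neg (by simpa using ha),
        ih, pv_find_drop a x (by omega)]


theorem pvB_push_eq (s : List Int) (ts : Int) :
    pvB_push s ts = (s.reverse.dropWhile (fun v => decide (ts ≤ v))).reverse ++ [ts] := by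
  fun_induction pvB_push s ts with
  | case1 s v hg hts ih =>
    obtain ⟨l', rfl⟩ := List.getLast?_eq_some_iff.mp hg
    rw [ih]
    simp [List.dropWhile_cons, hts]
  | case2 s v hg hts =>
    obtain ⟨l', rfl⟩ := List.getLast?_eq_some_iff.mp hg
    simp [List.dropWhile_cons, hts]
  | case3 s hg =>
    rw [List.getLast?_eq_none_iff.mp hg]
    simp


theorem pvB_bs_spec (s : List Int) (x : Int) (hs : s.Pairwise (· < ·)) :
    ∀ (n lo hi : Nat), hi - lo ≤ n → hi ≤ s.length → lo ≤ hi →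
      (∀ j, j < lo → s.getD j 0 < x) →
      (∀ j, hi ≤ j → j < s.length → ¬ s.getD j 0 < x) →
      (∀ j, j < pvB_bs s x lo hi → s.getD j 0 < x) ∧
      (∀ j, pvB_bs s x lo hi ≤ j → j < s.length → ¬ s.getD j 0 < x) ∧
      pvB_bs s x lo hi ≤ s.length := by
  intro n
  induction n with
  | zero =>
    intro lo hi hn hhi hlh hb ha
    have : ¬ lo < hi := by omega
    rw [pvB_bs, dif_neg this]
    exact ⟨fun j hj => hb j hj, fun j hj => ha j (by omega), by omega⟩
  | succ n ih =>
    intro lo hi hn hhi hlh hb ha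
    by_cases hlt : lo < hi
    · rw [pvB_bs, dif_pos hlt]
      simp only
      set mid := (lo + hi) / 2 with hmid
      have hmlt : mid < hi := by omega
      have hmge : lo ≤ mid := by omega
      have hmlen : mid < s.length := by omega
      by_cases hmx : s.getD mid 0 < x
      · rw [if_pos hmx]
        exact ih (mid + 1) hi (by omega) hhi (by omega)
          (fun j hj => by
            rcases Nat.lt_or_ge j mid with h | h
            · exact lt_trans (pv_sorted_getD hs h hmlen) hmx
            · have : j = mid := by omega
              rw [this]; exact hmx)
          ha
      · rw [if_neg hmx]
        exact ih lo mid (by omega) (by omega) (by omega) hb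
          (fun j hj hjl => by
            rcases Nat.lt_or_ge mid j with h | h
            · have := pv_sorted_getD hs h hjl; omega
            · have : j = mid := by omega
              rw [this]; exact hmx)
    · rw [pvB_bs, dif_neg hlt]
      exact ⟨fun j hj => hb j hj, fun j hj => ha j (by omega), by omega⟩


theorem pv_find?_of_first (p : Int → Bool) :
    ∀ (m : List Int) (t : Nat), t < m.length →
      (∀ j, j < t → p (m.getD j 0) = false) → p (m.getD t 0) = true →
      m.find? p = some (m.getD t 0) := by
  intro m
  induction m with
  | nil => intro t ht; simp at ht
  | cons b m ih =>
    intro t ht hbef hp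
    cases t with
    | zero =>
      simp only [List.getD] at hp ⊢
      rw [List.find?_cons_of_pos (by simpa using hp)]
      simp
    | succ t =>
      have hb0 : p b = false := by simpa using hbef 0 (by omega)
      rw [List.find?_cons_of_neg (by simp [hb0])]
      exact ih t (by simpa using ht) (fun j hj => by simpa using hbef (j+1) (by omega)) hp


theorem pv_getD_reverse (l : List Int) (j : Nat) (h : j < l.length) :
    l.reverse.getD j 0 = l.getD (l.length - 1 - j) 0 := by
  rw [l.reverse.getD_eq_getElem 0 (by simpa using h), l.getD_eq_getElem 0 (by omega)]
  simp [List.getElem_reverse]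


theorem pv_pred_eq (ts th : Int) :
    (fun p => decide (th < ts - p)) = (fun p : Int => decide (p < ts - th)) := by
  funext p; exact decide_eq_decide.mpr ⟨fun h => by omega, fun h => by omega⟩


theorem pvB_bridge (th : Int) :
    ∀ (rest acc : List Int) (u : List Int), u ≠ [] →
      pvB_loop th rest acc ((pvMS u).reverse) = acc ++ pvSpec th rest u := by
  intro rest
  induction rest with
  | nil => intro acc u hu; simp [pvB_loop, pvSpec]
  | cons ts rest ih =>
    intro acc u hu
    have hmp : (pvMS u).Pairwise (· > ·) := pvMS_pairwise u
    have hmne : pvMS u ≠ [] := by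
      cases u with
      | nil => exact absurd rfl hu
      | cons a u => simp [pvMS]
    set m := pvMS u with hm
    set s := m.reverse with hs
    have hlen : 0 < m.length := List.length_pos_iff.mpr hmne
    have hsp : s.Pairwise (· < ·) := by rw [hs, List.pairwise_reverse]; exact hmp
    have hslen : s.length = m.length := by simp [hs]
    have hmj : ∀ j, j < m.length → m.getD j 0 = s.getD (m.length - 1 - j) 0 := by
      intro j hj
      rw [hs, pv_getD_reverse m (m.length - 1 - j) (by omega)]
      congr 1
      omega
    simp only [pvB_loop, pvSpec]
    rw [pv_pred_eq ts th, pvMS_find (ts - th) u, ← hm]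
    by_cases hg : s.getD 0 0 < ts - th
    · rw [if_pos hg]
      obtain ⟨P1, P2, P3⟩ := pvB_bs_spec s (ts - th) hsp s.length 0 s.length (by omega) le_rfl
        (by omega) (fun j hj => absurd hj (by omega)) (fun j hj hjl => by omega)
      set r := pvB_bs s (ts - th) 0 s.length with hr
      have hr1 : 1 ≤ r := by
        by_contra hc
        exact P2 0 (by omega) (by omega) hg
      have hfind : m.find? (fun p => decide (p < ts - th)) = some (s.getD (r - 1) 0) := by
        have heq : m.getD (m.length - r) 0 = s.getD (r - 1) 0 := by
          rw [hmj (m.length - r) (by omega)]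
          congr 1
          omega
        rw [← heq]
        refine pv_find?_of_first _ m (m.length - r) (by omega) ?_ ?_
        · intro j hj
          have hjm : j < m.length := by omega
          rw [hmj j hjm]
          simpa using P2 (m.length - 1 - j) (by omega) (by omega)
        · rw [heq]
          simpa using P1 (r - 1) (by omega)
      rw [hfind]
      show pvB_loop th rest (acc ++ [ts - s.getD (r - 1) 0]) [ts]
            = acc ++ ((ts - s.getD (r - 1) 0) :: pvSpec th rest [ts])
      have hstep := ih (acc ++ [ts - s.getD (r - 1) 0]) [ts] (by simp)
      rw [show (pvMS [ts]).reverse = [ts] from by simp [pvMS]] at hstep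
      rw [hstep, List.append_assoc]
      rfl
    · rw [if_neg hg]
      have hnone : m.find? (fun p => decide (p < ts - th)) = none := by
        rw [List.find?_eq_none]
        intro v hv
        simp only [decide_eq_true_eq, not_lt]
        have hv' : v ∈ s := by rw [hs]; simpa using hv
        obtain ⟨j, hj, rfl⟩ := List.mem_iff_getElem.mp hv'
        rw [← s.getD_eq_getElem 0 hj]
        rcases Nat.eq_zero_or_pos j with rfl | hjp
        · omega
        · have := pv_sorted_getD hsp hjp hj
          omega
      rw [hnone]
      show pvB_loop th rest acc (pvB_push s ts) = acc ++ pvSpec th rest (ts :: u)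
      have hpush : pvB_push s ts = (pvMS (ts :: u)).reverse := by
        rw [pvB_push_eq s ts, hs, List.reverse_reverse]
        simp [pvMS, ← hm]
      rw [hpush]
      exact ih acc (ts :: u) (by simp)

-- ===== VERDICT (by name: the statement is the Claim_ definition above) =====
theorem get_beat_intervals_greater_than_threshold_spec : Claim_equal_get_beat_intervals_greater_than_threshold := by
  intro bts th _
  unfold Spec_get_beat_intervals_greater_than_threshold
  unfold get_beat_intervals_greater_than_threshold get_beat_intervals_greater_than_threshold_alt
  have hA := pvA_bridge (0 :: bts) th bts 1 0 [] (by omega) (by simp)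
  have hB := pvB_bridge th bts [] [0] (by simp)
  simp [pvMS] at hB
  simpa using hA.trans hB.symm
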